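-- pv_equiv track=rewrite | github.com/bbz6810/myNlp | model/word2vec.py | gen_word_tf_index
-- ===== SOURCE A (Python) =====
-- def gen_word_tf_index(data_list):
--     word_tf = dict()
--     word_index = dict()
--     for row in data_list:
--         for key in row:
--             word_tf[key] = word_tf.get(key, 0) + 1
--             if key not in word_index:
--                 word_index[key] = len(word_index)
--     word_index['b'] = len(word_index)
--     word_index['e'] = len(word_index)
--     return word_tf, word_index
-- ===== SOURCE B (Python) =====
-- def gen_word_tf_index(data_list):
--     words = [key for row in data_list for key in row]
--     pos = {}
--     cnt = {}
--     for i, w in reversed(list(enumerate(words))):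
--         pos[w] = i
--         cnt[w] = cnt.get(w, 0) + 1
--     keys = sorted(pos, key=pos.get)
--     word_tf = {k: cnt[k] for k in keys}
--     word_index = {k: i for i, k in enumerate(keys)}
--     word_index['b'] = len(word_index)
--     word_index['e'] = len(word_index)
--     return word_tf, word_index
-- ===== Notes on version B (the rewrite author's own statement) =====
-- stated objective: alternative
-- what changed: B scans the flattened word list backwards once, recording each word's first position by plain overwrite together with its count, and then recovers the first-appearance order by sorting the distinct words by first position (sort-by-position instead of A's forward nested loop that grows both dicts incrementally with a membership test).
import Mathlib
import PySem

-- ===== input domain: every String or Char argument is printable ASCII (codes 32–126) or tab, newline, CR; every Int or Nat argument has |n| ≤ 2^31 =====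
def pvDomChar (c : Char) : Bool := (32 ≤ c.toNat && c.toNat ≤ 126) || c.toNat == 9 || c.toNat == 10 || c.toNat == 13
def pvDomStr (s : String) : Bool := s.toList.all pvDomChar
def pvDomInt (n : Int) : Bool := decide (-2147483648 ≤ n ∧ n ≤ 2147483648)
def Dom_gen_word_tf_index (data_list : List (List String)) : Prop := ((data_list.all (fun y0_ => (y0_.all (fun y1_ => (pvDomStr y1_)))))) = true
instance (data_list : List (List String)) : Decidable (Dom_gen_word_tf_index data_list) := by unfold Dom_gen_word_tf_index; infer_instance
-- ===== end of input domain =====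

-- B replaces A's forward nested loop (which grows both dicts together under a membership test) by a
-- single backward scan recording first positions by overwrite plus counts, followed by a sort of the
-- distinct words by first position (alternative decomposition, not claimed faster).

-- ===== PORT A =====
-- A maintains both dicts jointly in one nested loop over rows and keys.
def gen_word_tf_index (data_list : List (List String)) : (List (String × Int)) × (List (String × Int)) :=
  let st := data_list.foldl
    (fun (st : PySem.Dict String Int × PySem.Dict String Int) row =>
      row.foldl
        (fun st key =>
          (st.1.insert key (st.1.getD key 0 + 1),
           if st.2.contains key then st.2 else st.2.insert key (st.2.size : Int)))
        st)
    (PySem.Dict.empty, PySem.Dict.empty)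
  let widx := st.2.insert "b" (st.2.size : Int)
  let widx := widx.insert "e" (widx.size : Int)
  (st.1.items, widx.items)

-- ===== PORT B =====
-- B flattens, scans `reversed(list(enumerate(words)))` once overwriting pos[w] = i and counting,
-- then sorts the distinct words by first position and derives both dicts from that key order.
def gen_word_tf_index_alt (data_list : List (List String)) : (List (String × Int)) × (List (String × Int)) :=
  let words := data_list.flatMap (fun row => row)
  let st := (PySem.List.enumerate words 0).reverse.foldl
    (fun (st : PySem.Dict String Int × PySem.Dict String Int) p =>
      (st.1.insert p.2 p.1, st.2.insert p.2 (st.2.getD p.2 0 + 1)))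
    (PySem.Dict.empty, PySem.Dict.empty)
  let pos := st.1
  let cnt := st.2
  let keys := PySem.List.sorted pos.keys (fun k => pos.getD k 0) false
  -- cnt[k]: every k ∈ keys is a key of cnt, so .getD is exact here (no KeyError is reachable)
  let word_tf := keys.foldl (fun (d : PySem.Dict String Int) k => d.insert k (cnt.getD k 0)) PySem.Dict.empty
  let word_index := (PySem.List.enumerate keys 0).foldl
    (fun (d : PySem.Dict String Int) p => d.insert p.2 p.1) PySem.Dict.empty
  let word_index := word_index.insert "b" (word_index.size : Int)
  let word_index := word_index.insert "e" (word_index.size : Int)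
  (word_tf.items, word_index.items)

-- ===== PRECONDITION & SPEC =====
def Spec_gen_word_tf_index (data_list : List (List String)) (out : (List (String × Int)) × (List (String × Int))) : Prop := out = gen_word_tf_index_alt data_list
instance (data_list : List (List String)) (out : (List (String × Int)) × (List (String × Int))) : Decidable (Spec_gen_word_tf_index data_list out) := by unfold Spec_gen_word_tf_index; infer_instance

-- ===== CLAIM (what is proved, stated in full; the proofs are below) =====
def Claim_equal_gen_word_tf_index : Prop := ∀ (data_list : List (List String)), Dom_gen_word_tf_index data_list → Spec_gen_word_tf_index data_list (gen_word_tf_index data_list)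

-- ===== LEMMAS AND PROOFS =====

-- the index dict A maintains, characterised: keys of the counter, enumerated
def pvMkIdx (ks : List String) : PySem.Dict String Int :=
  PySem.Dict.mk ((PySem.List.enumerate ks).map (fun p => (p.2, p.1)))

theorem pvKeys_mkIdx (ks : List String) : (pvMkIdx ks).keys = ks := by
  simp only [pvMkIdx, PySem.Dict.keys, List.map_map]
  have h : ((fun x : String × Int => x.1) ∘ fun p : Int × String => (p.2, p.1))
      = fun p : Int × String => p.2 := rfl
  rw [h, PySem.List.map_snd_enumerate]

theorem pvEnum_append_singleton {α : Type} (xs : List α) (x : α) (s : Int) :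
    PySem.List.enumerate (xs ++ [x]) s
      = PySem.List.enumerate xs s ++ [((s + xs.length : Int), x)] := by
  induction xs generalizing s with
  | nil => simp [PySem.List.enumerate]
  | cons y ys ih =>
      simp only [List.cons_append, PySem.List.enumerate, ih, List.length_cons]
      have h : s + 1 + (ys.length : Int) = s + ((ys.length : Int) + 1) := by ring
      push_cast
      rw [h]

theorem pvStep_inv (tf : PySem.Dict String Int) (k : String) :
    (if (pvMkIdx tf.keys).contains k then pvMkIdx tf.keys
     else (pvMkIdx tf.keys).insert k ((pvMkIdx tf.keys).size : Int))
      = pvMkIdx (tf.insert k (tf.getD k 0 + 1)).keys := by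
  by_cases hc : tf.contains k = true
  · have hk : (pvMkIdx tf.keys).contains k = true := by
      rw [PySem.Dict.contains_iff_mem_keys, pvKeys_mkIdx]
      exact (PySem.Dict.contains_iff_mem_keys tf k).mp hc
    rw [if_pos hk, PySem.Dict.keys_insert_of_contains tf _ hc]
  · have hc' : tf.contains k = false := by simpa using hc
    have hk : (pvMkIdx tf.keys).contains k = false := by
      have : ¬ k ∈ tf.keys := fun hm =>
        hc ((PySem.Dict.contains_iff_mem_keys tf k).mpr hm)
      have : ¬ (pvMkIdx tf.keys).contains k = true := by
        rw [PySem.Dict.contains_iff_mem_keys, pvKeys_mkIdx]; exact this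
      simpa using this
    rw [if_neg (by simp [hk]), PySem.Dict.keys_insert_of_not_contains tf _ hc']
    apply PySem.Dict.ext
    rw [PySem.Dict.items_insert_of_not_contains _ _ hk]
    simp [pvMkIdx, pvEnum_append_singleton, PySem.Dict.size,
      PySem.List.length_enumerate]

theorem pvFold_inv (ws : List String) (tf : PySem.Dict String Int) :
    ws.foldl
        (fun (st : PySem.Dict String Int × PySem.Dict String Int) key =>
          (st.1.insert key (st.1.getD key 0 + 1),
           if st.2.contains key then st.2 else st.2.insert key (st.2.size : Int)))
        (tf, pvMkIdx tf.keys)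
      = (ws.foldl (fun d key => d.insert key (d.getD key 0 + 1)) tf,
         pvMkIdx ((ws.foldl (fun d key => d.insert key (d.getD key 0 + 1)) tf).keys)) := by
  induction ws generalizing tf with
  | nil => rfl
  | cons w ws ih =>
      simp only [List.foldl_cons, pvStep_inv tf w]
      exact ih (tf.insert w (tf.getD w 0 + 1))

theorem pvFold_nested {σ : Type} (f : σ → String → σ) (data_list : List (List String)) (st0 : σ) :
    data_list.foldl (fun st row => row.foldl f st) st0
      = (data_list.flatMap (fun row => row)).foldl f st0 := by
  induction data_list generalizing st0 with
  | nil => rfl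
  | cons r rs ih => simp only [List.foldl_cons, List.flatMap_cons, List.foldl_append, ih]

-- the pos dict built by the backward scan: last write wins = first pair of the pair list
theorem pvRevFold_getD (l : List (Int × String)) (d : PySem.Dict String Int) (k : String) :
    (l.reverse.foldl (fun (d : PySem.Dict String Int) p => d.insert p.2 p.1) d).getD k 0
      = match l.find? (fun p => p.2 == k) with
        | some p => p.1
        | none => d.getD k 0 := by
  induction l generalizing d with
  | nil => rfl
  | cons x t ih =>
      simp only [List.reverse_cons, List.foldl_append, List.foldl_cons, List.foldl_nil,
        List.find?_cons]
      rw [PySem.Dict.getD_insert]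
      by_cases hk : k = x.2
      · simp [hk]
      · have : (x.2 == k) = false := by simp [Ne.symm hk]
        simp only [this, if_neg hk]
        exact ih d

-- first matching pair of enumerate = index of first occurrence
theorem pvFind_enumerate (ws : List String) (s : Int) (k : String) (h : k ∈ ws) :
    (PySem.List.enumerate ws s).find? (fun p => p.2 == k)
      = some ((s + (ws.idxOf k : Int)), k) := by
  induction ws generalizing s with
  | nil => cases h
  | cons w t ih =>
      rw [PySem.List.enumerate_cons, List.find?_cons]
      by_cases hw : w = k
      · simp [hw]
      · have hb : (w == k) = false := by simp [hw]
        have hm : k ∈ t := by cases h with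
          | head => exact absurd rfl hw
          | tail _ h => exact h
        simp only [hb]
        rw [ih (s + 1) hm, List.idxOf_cons_ne _ hw]
        congr 2
        push_cast
        ring

-- distinct first occurrences, in first-appearance order, have strictly increasing idxOf
theorem pvPairwise_idxOf (ws : List String) :
    (PySem.Set.ofList ws).Pairwise (fun a b => ws.idxOf a < ws.idxOf b) := by
  induction ws using List.reverseRecOn with
  | nil => simp [PySem.Set.ofList]
  | append_singleton xs x ih =>
      have hof : PySem.Set.ofList (xs ++ [x]) = PySem.Set.add (PySem.Set.ofList xs) x := by
        rw [PySem.Set.ofList_eq_foldl, List.foldl_append]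
        rfl
      have hmemS : ∀ a, a ∈ PySem.Set.ofList xs ↔ a ∈ xs := fun a => PySem.Set.mem_ofList xs a
      by_cases hx : x ∈ xs
      · have hc : PySem.Set.add (PySem.Set.ofList xs) x = PySem.Set.ofList xs := by
          unfold PySem.Set.add
          rw [if_pos]
          simp [PySem.Set.contains, (hmemS x).mpr hx]
        rw [hof, hc]
        refine ih.imp_of_mem ?_
        intro a b ha hb hab
        rw [List.idxOf_append_of_mem ((hmemS a).mp ha),
            List.idxOf_append_of_mem ((hmemS b).mp hb)]
        exact hab
      · have hc : PySem.Set.add (PySem.Set.ofList xs) x = PySem.Set.ofList xs ++ [x] := by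
          unfold PySem.Set.add
          rw [if_neg]
          simp [PySem.Set.contains, hx]
        rw [hof, hc, List.pairwise_append]
        refine ⟨ih.imp_of_mem ?_, by simp, ?_⟩
        · intro a b ha hb hab
          rw [List.idxOf_append_of_mem ((hmemS a).mp ha),
              List.idxOf_append_of_mem ((hmemS b).mp hb)]
          exact hab
        · intro a ha b hb
          have hb' : b = x := by simpa using hb
          subst hb'
          rw [List.idxOf_append_of_mem ((hmemS a).mp ha),
              List.idxOf_append_of_notMem hx]
          have : xs.idxOf a < xs.length := List.idxOf_lt_length_of_mem ((hmemS a).mp ha)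
          simpa using Nat.lt_of_lt_of_le this (by simp)

-- ===== VERDICT (by name: the statement is the Claim_ definition above) =====
theorem gen_word_tf_index_spec : Claim_equal_gen_word_tf_index := by
  intro data_list _
  unfold Spec_gen_word_tf_index gen_word_tf_index gen_word_tf_index_alt
  dsimp only
  rw [pvFold_nested]
  have h0 : ((PySem.Dict.empty : PySem.Dict String Int),
             (PySem.Dict.empty : PySem.Dict String Int))
      = ((PySem.Dict.empty : PySem.Dict String Int),
         pvMkIdx (PySem.Dict.empty : PySem.Dict String Int).keys) := rfl
  rw [h0, pvFold_inv,
      PySem.List.foldl_prod_mk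
        (f := fun (d : PySem.Dict String Int) (p : Int × String) => d.insert p.2 p.1)
        (g := fun (d : PySem.Dict String Int) (p : Int × String) =>
          d.insert p.2 (d.getD p.2 0 + 1))]
  set words := data_list.flatMap (fun row => row) with hwords
  set E := PySem.List.enumerate words 0 with hE
  set pos := E.reverse.foldl
      (fun (d : PySem.Dict String Int) (p : Int × String) => d.insert p.2 p.1)
      PySem.Dict.empty with hpos
  set cnt := E.reverse.foldl
      (fun (d : PySem.Dict String Int) (p : Int × String) =>
        d.insert p.2 (d.getD p.2 0 + 1))
      PySem.Dict.empty with hcnt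
  set S := PySem.Set.ofList words with hS
  have hsnd : E.reverse.map (fun p => p.2) = words.reverse := by
    rw [List.map_reverse, hE, PySem.List.map_snd_enumerate]
  -- cnt looks up to the plain count
  have hcntD : ∀ k, cnt.getD k 0 = (words.count k : Int) := by
    intro k
    have hmap : (E.reverse.map (fun p : Int × String => p.2)).foldl
        (fun (d : PySem.Dict String Int) x => d.insert x (d.getD x 0 + 1)) PySem.Dict.empty
        = E.reverse.foldl
            (fun (d : PySem.Dict String Int) p => d.insert p.2 (d.getD p.2 0 + 1))
            PySem.Dict.empty := by
      rw [List.foldl_map]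
    rw [hcnt, ← hmap, hsnd,
      PySem.Dict.getD_foldl_insert_add_one, PySem.Dict.getD_empty, List.count_reverse]
    simp
  -- pos's keys are the distinct words (in last-to-first order)
  have hposkeys : pos.keys = PySem.Set.ofList words.reverse := by
    rw [hpos, PySem.Dict.keys_foldl_insert_key E.reverse (fun p => p.2) (fun _ p => p.1),
      PySem.Dict.keys_empty, hsnd]
    rfl
  -- pos looks up to the first-occurrence index
  have hposD : ∀ k, k ∈ words → pos.getD k 0 = (words.idxOf k : Int) := by
    intro k hk
    rw [hpos, pvRevFold_getD, hE, pvFind_enumerate words 0 k hk]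
    simp
  -- the sort rebuilds first-appearance order
  have hsorted : PySem.List.sorted pos.keys (fun k => pos.getD k 0) false = S := by
    apply PySem.List.sorted_eq_of_perm_of_pairwise_lt
    · have hnd1 : S.Nodup := by rw [hS]; exact PySem.Set.nodup_ofList words
      have hnd2 : pos.keys.Nodup := by
        rw [hposkeys]; exact PySem.Set.nodup_ofList words.reverse
      apply (List.perm_ext_iff_of_nodup hnd1 hnd2).mpr
      intro a
      rw [hposkeys, hS]
      simp only [PySem.Set.mem_ofList, List.mem_reverse]
    · refine (pvPairwise_idxOf words).imp_of_mem ?_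
      intro a b ha hb hab
      have ha' : a ∈ words := (PySem.Set.mem_ofList words a).mp ha
      have hb' : b ∈ words := (PySem.Set.mem_ofList words b).mp hb
      rw [hposD a ha', hposD b hb']
      exact_mod_cast hab
  rw [hsorted]
  -- first component: word_tf
  have htf : (S.foldl (fun (d : PySem.Dict String Int) k => d.insert k (cnt.getD k 0))
        PySem.Dict.empty).items
      = (words.foldl (fun (d : PySem.Dict String Int) key =>
          d.insert key (d.getD key 0 + 1)) PySem.Dict.empty).items := by
    rw [PySem.Dict.items_foldl_insert_fresh S (fun k => k) (fun k => cnt.getD k 0)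
        PySem.Dict.empty (by intro a _; simp [PySem.Dict.contains_empty])
        (by rw [hS]; simp),
      PySem.Dict.foldl_insert_getD_add_one_eq_counter, PySem.Dict.items_counter]
    have he : (PySem.Dict.empty : PySem.Dict String Int).items = [] := rfl
    rw [he, List.nil_append, hS]
    exact List.map_congr_left (fun k _ => by rw [hcntD k])
  -- second component: word_index base dict
  have hidx : (PySem.List.enumerate S 0).foldl
        (fun (d : PySem.Dict String Int) p => d.insert p.2 p.1) PySem.Dict.empty
      = pvMkIdx ((words.foldl (fun (d : PySem.Dict String Int) key =>
          d.insert key (d.getD key 0 + 1)) PySem.Dict.empty).keys) := by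
    rw [PySem.Dict.foldl_insert_getD_add_one_eq_counter, PySem.Dict.keys_counter]
    apply PySem.Dict.ext
    rw [PySem.Dict.items_foldl_insert_fresh (PySem.List.enumerate S 0)
        (fun p => p.2) (fun p => p.1) PySem.Dict.empty
        (by intro a _; simp [PySem.Dict.contains_empty])
        (by rw [PySem.List.map_snd_enumerate, hS]; exact PySem.Set.nodup_ofList words)]
    rfl
  rw [hidx]
  exact congrArg₂ Prod.mk htf.symm rfl
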